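-- pv_equiv track=rewrite | github.com/mbkeating/AIMC | data/CheckData.py | get_notes_in_chord
-- ===== SOURCE A (Python) =====
-- notes = ["A", "A#", "B", "C", "C#", "D", "D#", "E", "F", "F#", "G", "G#"]
--
-- def note_index(note):
--     # get index
--     index = -1
--     for i in range(len(notes)):
--         if notes[i] == note:
--             index = i
--     return index
--
-- def get_notes_in_chord(chord):
--     chords = {
--         "min": [3, 4],
--         "min7": [3, 4, 3],
--         "min6": [3, 4, 2],
--         "6": [4, 3, 2],
--         "maj6": [4, 3, 2],
--         "7": [4, 3, 3],
--         "9": [4, 3, 3, 4],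
--         "": [4, 3],
--         "7f9": [4, 3, 3, 3],
--         "7f5": [4, 2, 4],
--         "min7f5": [3, 3, 4],
--         "aug": [4, 4],
--         "dim7": [3, 3, 3],
--         "maj7": [4, 3, 4]
--     }
--
--     if "#" in chord:
--         note = chord[0:2]
--         chord_type = chord[2:]
--     else:
--         note = chord[0]
--         chord_type = chord[1:]
--
--     index = note_index(note)
--     if index == -1:
--         return []
--     if chord_type not in chords:
--         return []
--
--     chord_notes = [notes[index]]
--     for interval in chords[chord_type]:
--         chord_notes.append(notes[(index + interval) % 12])
--         index += interval
--
--     return chord_notes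
-- ===== SOURCE B (Python) =====
-- NOTES = ["A", "A#", "B", "C", "C#", "D", "D#", "E", "F", "F#", "G", "G#"]
--
-- CHORDS = {
--     "min": [3, 4],
--     "min7": [3, 4, 3],
--     "min6": [3, 4, 2],
--     "6": [4, 3, 2],
--     "maj6": [4, 3, 2],
--     "7": [4, 3, 3],
--     "9": [4, 3, 3, 4],
--     "": [4, 3],
--     "7f9": [4, 3, 3, 3],
--     "7f5": [4, 2, 4],
--     "min7f5": [3, 3, 4],
--     "aug": [4, 4],
--     "dim7": [3, 3, 3],
--     "maj7": [4, 3, 4]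
-- }
--
-- def _build_table():
--     # Precompute every nameable chord once: rotate the note circle to the root,
--     # then read each note off at the prefix-sum position of the intervals.
--     table = {}
--     for i, root in enumerate(NOTES):
--         rotated = NOTES[i:] + NOTES[:i]
--         for typ, ivs in CHORDS.items():
--             table[root + typ] = [rotated[sum(ivs[:k]) % 12] for k in range(len(ivs) + 1)]
--     return table
--
-- CHORD_TABLE = _build_table()
--
-- def get_notes_in_chord(chord):
--     return CHORD_TABLE.get(chord, [])
-- ===== Notes on version B (the rewrite author's own statement) =====
-- stated objective: alternative
-- what changed: B does no parsing or interval accumulation at call time: it precomputes once a lookup table of all 168 nameable chords (root+type -> note list, built by rotating the note circle and reading prefix-sum positions) and get_notes_in_chord is a single dict .get with default [].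
import Mathlib
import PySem

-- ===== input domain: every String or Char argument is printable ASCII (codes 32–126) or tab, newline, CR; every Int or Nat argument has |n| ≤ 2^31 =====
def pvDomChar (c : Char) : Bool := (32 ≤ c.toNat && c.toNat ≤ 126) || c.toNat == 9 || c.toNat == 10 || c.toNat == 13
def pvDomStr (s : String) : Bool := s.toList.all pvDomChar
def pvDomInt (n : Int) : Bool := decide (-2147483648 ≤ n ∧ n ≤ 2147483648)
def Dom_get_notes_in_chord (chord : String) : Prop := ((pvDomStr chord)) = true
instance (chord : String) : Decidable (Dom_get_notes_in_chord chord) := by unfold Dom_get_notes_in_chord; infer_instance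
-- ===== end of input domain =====

set_option maxRecDepth 100000

-- B precomputes a lookup table of all 168 nameable chords once (rotated note circle, prefix-sum
-- positions) so a call is a single dict lookup with no parsing (objective: alternative).

-- ===== PORT A =====
-- notes = ["A", ...]
def pvNotes : List String := ["A", "A#", "B", "C", "C#", "D", "D#", "E", "F", "F#", "G", "G#"]

-- note_index: linear scan keeping the LAST matching index, -1 if none
def note_index (note : String) : Int :=
  (PySem.List.pyRange 0 (pvNotes.length : Int) 1).foldl
    (fun index i => if PySem.List.pyGetD pvNotes i "" = note then i else index) (-1)

def pvChordsA : PySem.Dict String (List Int) :=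
  PySem.Dict.ofList [("min", [3, 4]), ("min7", [3, 4, 3]), ("min6", [3, 4, 2]),
    ("6", [4, 3, 2]), ("maj6", [4, 3, 2]), ("7", [4, 3, 3]), ("9", [4, 3, 3, 4]),
    ("", [4, 3]), ("7f9", [4, 3, 3, 3]), ("7f5", [4, 2, 4]), ("min7f5", [3, 3, 4]),
    ("aug", [4, 4]), ("dim7", [3, 3, 3]), ("maj7", [4, 3, 4])]

-- the body of A after the note/chord_type parse (A's code, continued verbatim)
def pvACore (note chord_type : String) : List String :=
  let index := note_index note
  if index = -1 then []
  else if pvChordsA.contains chord_type = false then []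
  else
    let st := (pvChordsA.getD chord_type []).foldl
      (fun (st : List String × Int) interval =>
        (st.1 ++ [PySem.List.pyGetD pvNotes (PySem.Int.mod (st.2 + interval) 12) ""],
         st.2 + interval))
      ([PySem.List.pyGetD pvNotes index ""], index)
    st.1

def get_notes_in_chord (chord : String) : List String :=
  if PySem.Str.isIn "#" chord then
    pvACore (PySem.Str.slice chord (some 0) (some 2)) (PySem.Str.slice chord (some 2) none)
  else
    match PySem.Str.pyGet? chord 0 with
    | none => []   -- chord[0] raises IndexError here (chord = ""): excluded by Pre_
    | some c => pvACore (String.ofList [c]) (PySem.Str.slice chord (some 1) none)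

-- ===== PORT B =====
def pvNotesB : List String := ["A", "A#", "B", "C", "C#", "D", "D#", "E", "F", "F#", "G", "G#"]

def pvChordsB : PySem.Dict String (List Int) :=
  PySem.Dict.ofList [("min", [3, 4]), ("min7", [3, 4, 3]), ("min6", [3, 4, 2]),
    ("6", [4, 3, 2]), ("maj6", [4, 3, 2]), ("7", [4, 3, 3]), ("9", [4, 3, 3, 4]),
    ("", [4, 3]), ("7f9", [4, 3, 3, 3]), ("7f5", [4, 2, 4]), ("min7f5", [3, 3, 4]),
    ("aug", [4, 4]), ("dim7", [3, 3, 3]), ("maj7", [4, 3, 4])]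

-- _build_table(): for each root, rotate the circle of notes; for each chord type, read the note
-- at each prefix-sum position of the intervals; key the result under root + typ.
def pvTableB : PySem.Dict String (List String) :=
  (PySem.List.enumerate pvNotesB 0).foldl (fun table p =>
    let rotated := PySem.List.slice pvNotesB (some p.1) none ++
                   PySem.List.slice pvNotesB none (some p.1)
    pvChordsB.items.foldl (fun table q =>
      table.insert (p.2 ++ q.1)
        ((PySem.List.pyRange 0 ((q.2.length : Int) + 1) 1).map (fun k =>
          PySem.List.pyGetD rotated
            (PySem.Int.mod (PySem.List.slice q.2 none (some k)).sum 12) "")))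
      table)
    PySem.Dict.empty

-- CHORD_TABLE.get(chord, [])
def get_notes_in_chord_alt (chord : String) : List String :=
  pvTableB.getD chord []

-- ===== PRECONDITION & SPEC =====
-- Pre_ excludes only the empty string, the single input on which A raises (IndexError at chord[0]).
def Pre_get_notes_in_chord (chord : String) : Prop := chord ≠ ""
instance (chord : String) : Decidable (Pre_get_notes_in_chord chord) := by
  unfold Pre_get_notes_in_chord; infer_instance

def pvWitness_get_notes_in_chord : String := "Amin7"

def Spec_get_notes_in_chord (chord : String) (out : List String) : Prop :=
  out = get_notes_in_chord_alt chord
instance (chord : String) (out : List String) : Decidable (Spec_get_notes_in_chord chord out) := by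
  unfold Spec_get_notes_in_chord; infer_instance

-- ===== CLAIM (what is proved, stated in full; the proofs are below) =====
def Claim_equal_get_notes_in_chord : Prop := ∀ (chord : String),
  Dom_get_notes_in_chord chord → Pre_get_notes_in_chord chord →
  Spec_get_notes_in_chord chord (get_notes_in_chord chord)

-- ===== LEMMAS AND PROOFS =====

theorem str_eq_of_toList {s t : String} (h : s.toList = t.toList) : s = t := by
  have := congrArg String.ofList h
  simpa [String.ofList_toList] using this

theorem ofList_append (a b : List Char) :
    String.ofList (a ++ b) = String.ofList a ++ String.ofList b := by
  apply str_eq_of_toList; simp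

theorem foldl_scan_neq (l : List Int) (note : String) (init : Int)
    (h : ∀ i ∈ l, PySem.List.pyGetD pvNotes i "" ≠ note) :
    l.foldl (fun index i => if PySem.List.pyGetD pvNotes i "" = note then i else index) init
      = init := by
  induction l generalizing init with
  | nil => rfl
  | cons a t ih =>
    rw [List.foldl_cons, if_neg (h a (by simp))]
    exact ih init fun i hi => h i (by simp [hi])

theorem note_index_not_mem {note : String} (h : note ∉ pvNotes) : note_index note = -1 := by
  unfold note_index
  apply foldl_scan_neq
  intro i hi
  rw [PySem.List.mem_pyRange_one] at hi
  rw [PySem.List.pyGetD_eq_getElem pvNotes "" hi.1 hi.2]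
  intro heq
  exact h (heq ▸ List.getElem_mem _)

theorem isIn_hash (l : List Char) :
    PySem.Str.isIn "#" (String.ofList l) = decide ('#' ∈ l) := by
  by_cases h : '#' ∈ l
  · simp only [h, decide_true]
    simp only [PySem.Str.isIn, String.toList_ofList, show ("#" : String).toList = ['#'] from rfl]
    rw [PySem.Chars.isIn_iff_infix, List.singleton_infix_iff]; exact h
  · simp only [h, decide_false]
    simp only [PySem.Str.isIn, String.toList_ofList, show ("#" : String).toList = ['#'] from rfl]
    rw [PySem.Chars.isIn_eq_false_iff, List.singleton_infix_iff]; exact h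

theorem slice_zero_two (l : List Char) :
    PySem.Str.slice (String.ofList l) (some 0) (some 2) = String.ofList (l.take 2) := by
  apply str_eq_of_toList; simp [pysem]

theorem slice_from_two (l : List Char) :
    PySem.Str.slice (String.ofList l) (some 2) none = String.ofList (l.drop 2) := by
  apply str_eq_of_toList; simp [pysem]

theorem slice_from_one (l : List Char) :
    PySem.Str.slice (String.ofList l) (some 1) none = String.ofList (l.drop 1) := by
  apply str_eq_of_toList; simp [pysem]

theorem a_hash (l : List Char) (h : '#' ∈ l) :
    get_notes_in_chord (String.ofList l)
      = pvACore (String.ofList (l.take 2)) (String.ofList (l.drop 2)) := by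
  simp only [get_notes_in_chord, isIn_hash, h, decide_true, if_true, slice_zero_two, slice_from_two]

theorem a_nohash (c0 : Char) (t : List Char) (h : '#' ∉ c0 :: t) :
    get_notes_in_chord (String.ofList (c0 :: t))
      = pvACore (String.ofList [c0]) (String.ofList t) := by
  simp only [get_notes_in_chord, isIn_hash, h, decide_false, Bool.false_eq_true, if_false,
    slice_from_one]
  simp

-- every table entry agrees with A
theorem table_items_sound : ∀ p ∈ pvTableB.items, get_notes_in_chord p.1 = p.2 := by decide

-- every parseable chord name is a table key
theorem valid_mem_table : ∀ n ∈ pvNotes, ∀ t ∈ pvChordsA.keys, (n ++ t) ∈ pvTableB.keys := by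
  decide

theorem alt_of_not_key {chord : String} (h : chord ∉ pvTableB.keys) :
    get_notes_in_chord_alt chord = [] := by
  unfold get_notes_in_chord_alt
  exact PySem.Dict.getD_of_get?_eq_none _ _
    ((PySem.Dict.get?_eq_none_iff_not_mem_keys _ _).mpr h)

theorem eq_of_key {chord : String} (h : chord ∈ pvTableB.keys) :
    get_notes_in_chord chord = get_notes_in_chord_alt chord := by
  obtain ⟨v, hv⟩ : ∃ v, pvTableB.get? chord = some v := by
    cases hx : pvTableB.get? chord with
    | none => exact absurd ((PySem.Dict.get?_eq_none_iff_not_mem_keys _ _).mp hx) (not_not_intro h)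
    | some v => exact ⟨v, rfl⟩
  have hmem := PySem.Dict.mem_items_of_get?_eq_some _ hv
  rw [table_items_sound _ hmem]
  unfold get_notes_in_chord_alt
  rw [PySem.Dict.getD_of_get?_eq_some _ _ hv]

-- if the parsed pieces do not both look up, A returns []
theorem core_nil_of_not_key (note typ : String) (hkey : note ++ typ ∉ pvTableB.keys) :
    pvACore note typ = [] := by
  by_cases hn : note ∈ pvNotes
  · by_cases ht : typ ∈ pvChordsA.keys
    · exact absurd (valid_mem_table note hn typ ht) hkey
    · have hc : pvChordsA.contains typ = false := by
        rw [PySem.Dict.contains_eq_decide_mem_keys]; simpa using ht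
      simp [pvACore, hc]
  · simp [pvACore, note_index_not_mem hn]

theorem main_eq (chord : String) (hpre : chord ≠ "") :
    get_notes_in_chord chord = get_notes_in_chord_alt chord := by
  by_cases hk : chord ∈ pvTableB.keys
  · exact eq_of_key hk
  · rw [alt_of_not_key hk]
    obtain ⟨cs, rfl⟩ : ∃ cs, chord = String.ofList cs :=
      ⟨chord.toList, by rw [String.ofList_toList]⟩
    rcases cs with _ | ⟨c0, t⟩
    · exact absurd rfl hpre
    · by_cases hsh : '#' ∈ c0 :: t
      · rw [a_hash _ hsh]
        apply core_nil_of_not_key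
        rw [← ofList_append, List.take_append_drop]
        exact hk
      · rw [a_nohash _ _ hsh]
        apply core_nil_of_not_key
        rw [← ofList_append]
        exact hk

-- ===== VERDICT (by name: the statement is the Claim_ definition above) =====
theorem get_notes_in_chord_spec : Claim_equal_get_notes_in_chord := by
  intro chord _ hpre
  unfold Spec_get_notes_in_chord
  exact main_eq chord hpre
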